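-- pv_equiv track=rewrite | github.com/paulgazz/kconfig_case_studies | scripts/deduplicate_project/scripts/compute_minimal_subset.py | compute_config_counts
-- ===== SOURCE A (Python) =====
-- def compute_config_counts(dataset):
--     counts = dict()
--     for d in dataset:
--         for n in d['configs']:
--             if n not in counts:
--                 counts[n] = 1
--             else:
--                 counts[n] = counts[n] + 1
--     return counts
-- ===== SOURCE B (Python) =====
-- def compute_config_counts(dataset):
--     # Count-and-remove: flatten all names once, then repeatedly take the first
--     # remaining name, record its total with list.count, and filter out all of
--     # its occurrences before continuing. Keys come out in first-occurrence
--     # order, exactly like A's incremental dict counter.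
--     names = [n for d in dataset for n in d['configs']]
--     counts = {}
--     while names:
--         n = names[0]
--         counts[n] = names.count(n)
--         names = [x for x in names if x != n]
--     return counts
-- ===== Notes on version B (the rewrite author's own statement) =====
-- stated objective: alternative
-- what changed: Replaces the incremental dict-counter over nested loops by flattening all names and then a count-and-remove loop: take the first remaining name, record its list.count total, filter out all its occurrences, repeat until the list is empty.
import Mathlib
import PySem

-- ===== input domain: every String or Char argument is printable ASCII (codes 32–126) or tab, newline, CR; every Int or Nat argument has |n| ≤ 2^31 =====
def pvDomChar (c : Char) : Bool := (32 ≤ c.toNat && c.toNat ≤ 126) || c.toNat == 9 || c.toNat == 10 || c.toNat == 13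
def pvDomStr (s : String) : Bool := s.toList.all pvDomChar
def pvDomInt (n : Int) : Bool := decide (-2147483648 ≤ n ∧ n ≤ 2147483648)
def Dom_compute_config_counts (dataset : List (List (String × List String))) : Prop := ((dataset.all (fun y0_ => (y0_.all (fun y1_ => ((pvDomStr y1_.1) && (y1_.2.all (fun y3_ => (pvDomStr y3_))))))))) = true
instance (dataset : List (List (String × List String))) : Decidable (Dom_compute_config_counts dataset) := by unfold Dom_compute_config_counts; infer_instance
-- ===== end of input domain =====

-- B flattens all names then runs a count-and-remove loop (count the first remaining name, filter it out, repeat); A keeps a running dict counter over nested loops.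
-- ===== PORT A =====
-- d['configs'] raises KeyError when absent; Pre_ excludes that, so .getD [] is exact on Pre_.
def compute_config_counts (dataset : List (List (String × List String))) : List (String × Int) :=
  (dataset.foldl (fun counts d =>
      (((PySem.Dict.mk d).get? "configs").getD []).foldl (fun counts n =>
        if counts.contains n = false then counts.insert n (1 : Int)
        else counts.insert n (counts.getD n 0 + 1)) counts)
    PySem.Dict.empty).items

-- ===== PORT B =====
-- the while-loop of Source B: first remaining name, its count over the remaining list, filter it out
def cccLoop (names : List String) : List (String × Int) :=
  match names with
  | [] => []
  | n :: rest =>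
      (n, (PySem.List.count (n :: rest) n : Int)) ::
        cccLoop ((n :: rest).filter (fun x => x ≠ n))
termination_by names.length
decreasing_by
  have := List.length_filter_le (fun x => !decide (x = n)) rest
  simp_all

def compute_config_counts_alt (dataset : List (List (String × List String))) : List (String × Int) :=
  cccLoop (dataset.flatMap (fun d => ((PySem.Dict.mk d).get? "configs").getD []))

-- ===== PRECONDITION & SPEC =====
-- Pre_ excludes exactly the inputs where A raises KeyError: some dict lacking the key "configs".
def Pre_compute_config_counts (dataset : List (List (String × List String))) : Prop :=
  (dataset.all (fun d => (PySem.Dict.mk d).contains "configs")) = true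
instance (dataset : List (List (String × List String))) : Decidable (Pre_compute_config_counts dataset) := by unfold Pre_compute_config_counts; infer_instance
def pvWitness_compute_config_counts : (List (List (String × List String))) :=
  [[("configs", ["a", "b"])], [("configs", ["b"])]]
def Spec_compute_config_counts (dataset : List (List (String × List String))) (out : List (String × Int)) : Prop := out = compute_config_counts_alt dataset
instance (dataset : List (List (String × List String))) (out : List (String × Int)) : Decidable (Spec_compute_config_counts dataset out) := by unfold Spec_compute_config_counts; infer_instance

-- ===== CLAIM (what is proved, stated in full; the proofs are below) =====
def Claim_equal_compute_config_counts : Prop := ∀ (dataset : List (List (String × List String))), Dom_compute_config_counts dataset → Pre_compute_config_counts dataset → Spec_compute_config_counts dataset (compute_config_counts dataset)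

-- ===== LEMMAS AND PROOFS =====

-- A's inner branch is the canonical counter step (when the key is absent, getD is 0).
lemma ccc_step_eq (counts : PySem.Dict String Int) (n : String) :
    (if counts.contains n = false then counts.insert n (1 : Int)
     else counts.insert n (counts.getD n 0 + 1))
    = counts.insert n (counts.getD n 0 + 1) := by
  by_cases h : counts.contains n = false
  · simp [h, PySem.Dict.getD_of_not_contains (h := h)]
  · simp [h]

lemma foldl_flatMap_eq {α β γ : Type} (f : α → List β) (g : γ → β → γ) :
    ∀ (l : List α) (init : γ),
      l.foldl (fun acc d => (f d).foldl g acc) init = (l.flatMap f).foldl g init := by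
  intro l
  induction l with
  | nil => intro init; rfl
  | cons x xs ih => intro init; simp [List.flatMap_cons, List.foldl_append, ih]

-- Set.add onto an accumulator headed by an element not in the list peels the head off.
lemma foldl_add_cons_acc (n : String) :
    ∀ (l : List String) (s : List String), n ∉ l →
      l.foldl PySem.Set.add (n :: s) = n :: l.foldl PySem.Set.add s := by
  intro l
  induction l with
  | nil => intro s _; rfl
  | cons x xs ih =>
    intro s hn
    have hxn : ¬ (x = n) := fun h => hn (h ▸ List.mem_cons_self)
    have hxs : n ∉ xs := fun h => hn (List.mem_cons_of_mem _ h)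
    simp only [List.foldl_cons, PySem.Set.add, PySem.Set.contains, List.contains_cons]
    have hb : (x == n) = false := by simp [hxn]
    rw [hb, Bool.false_or]
    by_cases hc : s.contains x = true
    · rw [if_pos hc, if_pos hc]; exact ih _ hxs
    · rw [if_neg hc, if_neg hc]; exact ih _ hxs

-- folding Set.add over a list skips every occurrence of an element already in the accumulator
lemma foldl_add_skip (n : String) :
    ∀ (l : List String) (s : List String), n ∈ s →
      l.foldl PySem.Set.add s = (l.filter (fun x => x ≠ n)).foldl PySem.Set.add s := by
  intro l
  induction l with
  | nil => intro s _; rfl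
  | cons x xs ih =>
    intro s hs
    by_cases hx : x = n
    · subst hx
      have hadd : PySem.Set.add s x = s := by
        simp [PySem.Set.add, PySem.Set.contains, hs]
      simp only [List.foldl_cons, hadd, List.filter_cons]
      rw [if_neg (by simp)]
      exact ih s hs
    · simp only [List.filter_cons]
      rw [if_pos (by simp [hx])]
      simp only [List.foldl_cons]
      have hmem : n ∈ PySem.Set.add s x := by
        simp only [PySem.Set.add]
        split_ifs <;> simp [hs]
      exact ih _ hmem

-- first-occurrence dedup, cons form: head stays, later occurrences vanish
lemma ofList_cons (n : String) (rest : List String) :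
    PySem.Set.ofList (n :: rest) = n :: PySem.Set.ofList (rest.filter (fun x => x ≠ n)) := by
  have h1 : PySem.Set.ofList (n :: rest) = rest.foldl PySem.Set.add [n] := by
    simp [PySem.Set.ofList_eq_foldl, PySem.Set.add, PySem.Set.contains]
  rw [h1, foldl_add_skip n rest [n] (by simp)]
  rw [foldl_add_cons_acc n _ [] (by simp)]
  simp [PySem.Set.ofList_eq_foldl]

lemma count_filter_ne (n k : String) (l : List String) (hk : k ≠ n) :
    (l.filter (fun x => x ≠ n)).count k = l.count k := by
  induction l with
  | nil => rfl
  | cons x xs ih =>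
    simp only [List.filter_cons, ne_eq, decide_not] at ih ⊢
    by_cases hx : x = n
    · subst hx
      simp [ih, Ne.symm hk]
    · simp [hx, List.count_cons, ih]

-- the count-and-remove loop computes exactly Counter(names).items()
lemma cccLoop_eq (names : List String) :
    cccLoop names = (PySem.Set.ofList names).map (fun k => (k, (names.count k : Int))) := by
  induction names using cccLoop.induct with
  | case1 => rw [cccLoop]; rfl
  | case2 n rest ih =>
    have hfilter : (n :: rest).filter (fun x => x ≠ n) = rest.filter (fun x => x ≠ n) :=
      List.filter_cons_of_neg (by simp)
    rw [hfilter] at ih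
    rw [cccLoop, ofList_cons, hfilter, ih, List.map_cons]
    refine congrArg₂ List.cons ?_ ?_
    · simp [PySem.List.count_eq]
    · apply List.map_congr_left
      intro k hk
      have hk' : k ∈ rest.filter (fun x => x ≠ n) :=
        (PySem.Set.mem_ofList (y := k) (xs := rest.filter (fun x => x ≠ n))).mp hk
      have hkn : k ≠ n := by simpa using List.of_mem_filter hk'
      have h1 : (rest.filter (fun x => x ≠ n)).count k = rest.count k :=
        count_filter_ne n k rest hkn
      have h2 : (n :: rest).count k = rest.count k :=
        List.count_cons_of_ne (Ne.symm hkn)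
      rw [h1, h2]

-- ===== VERDICT (by name: the statement is the Claim_ definition above) =====
theorem compute_config_counts_spec : Claim_equal_compute_config_counts := by
  intro dataset _ _
  unfold Spec_compute_config_counts compute_config_counts compute_config_counts_alt
  have hstep : (fun (counts : PySem.Dict String Int) (n : String) =>
      if counts.contains n = false then counts.insert n (1 : Int)
      else counts.insert n (counts.getD n 0 + 1))
      = fun counts n => counts.insert n (counts.getD n 0 + 1) := by
    funext counts n; exact ccc_step_eq counts n
  rw [hstep, foldl_flatMap_eq, PySem.Dict.foldl_insert_getD_add_one_eq_counter,
      PySem.Dict.items_counter, cccLoop_eq]
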